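-- pv_equiv track=rewrite | github.com/Team3132/FRC-2021 | src/main/jevois/2019code.py | cal_corners
-- ===== SOURCE A (Python) =====
-- class Corner():
--     def __init__(self):
--         self.xy = []
--         self.score = -10000
--     def update_score(self, X, Y, score):
--         if score > self.score:
--             self.xy = [X,Y]
--             self.score = score
--
-- def cal_corners(contour):
--     TL_corner = Corner()
--     TR_corner = Corner()
--     BL_corner = Corner()
--     BR_corner = Corner()
--     # go through each point and see if it is a better corner then the last
--     for point in contour:
--         x = point[0][0] # +ve is more right.
--         y = point[0][1] # +ve is more down
--         TL_corner.update_score(x, y, -x -y)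
--         TR_corner.update_score(x, y, +x -y)
--         BL_corner.update_score(x, y, -x +y)
--         BR_corner.update_score(x, y, +x +y)
--     TL = TL_corner.xy
--     TR = TR_corner.xy
--     BL = BL_corner.xy
--     BR = BR_corner.xy
--     return [TL, TR, BL, BR]
-- ===== SOURCE B (Python) =====
-- def cal_corners(contour):
--     # Four independent max() reductions, one per corner direction (first maximal
--     # point wins, matching A's strict-'>' first-wins update).
--     if not contour:
--         return [[], [], [], []]
--     def best(sx, sy):
--         p = max(contour, key=lambda pt: sx * pt[0][0] + sy * pt[0][1])
--         return [p[0][0], p[0][1]]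
--     return [best(-1, -1), best(1, -1), best(-1, 1), best(1, 1)]
-- ===== Notes on version B (the rewrite author's own statement) =====
-- stated objective: idiomatic
-- what changed: Replaces A's Corner class and single stateful update loop by four independent first-maximal max()-style reductions (one per corner direction) and drops A's arbitrary -10000 sentinel threshold.
-- intended difference: On nonempty contours where, for one of the four corner directions, every point's score (±x±y) is <= -10000, A returns [] for that corner because its arbitrary -10000 sentinel is never beaten, while B returns the actual extreme point, which is the intended corner. — e.g. on cal_corners([[[0, 20000]]]): A returns [[], [], [0, 20000], [0, 20000]], B returns [[0, 20000], [0, 20000], [0, 20000], [0, 20000]]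
import Mathlib
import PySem

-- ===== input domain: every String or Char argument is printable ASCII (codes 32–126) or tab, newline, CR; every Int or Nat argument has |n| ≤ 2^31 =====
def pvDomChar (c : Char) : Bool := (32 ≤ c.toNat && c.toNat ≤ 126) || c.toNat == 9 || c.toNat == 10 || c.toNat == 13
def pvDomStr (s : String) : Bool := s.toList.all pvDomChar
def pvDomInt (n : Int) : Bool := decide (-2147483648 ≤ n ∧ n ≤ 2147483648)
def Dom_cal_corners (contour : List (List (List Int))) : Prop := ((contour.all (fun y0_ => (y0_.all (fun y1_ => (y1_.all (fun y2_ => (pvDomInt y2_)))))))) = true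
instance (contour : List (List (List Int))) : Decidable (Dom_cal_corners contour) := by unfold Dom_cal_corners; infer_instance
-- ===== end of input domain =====

-- B replaces A's Corner class and single stateful loop by four independent
-- first-maximal reductions (one per corner direction); B drops A's -10000
-- sentinel threshold, so on extreme inputs (see D_) B returns the true corner
-- where A returns [].

-- shared accessors for point[0][0] / point[0][1] (Pre_ guarantees they exist;
-- the .getD defaults are unreachable inside Pre_, where Python would raise)
def ptX (point : List (List Int)) : Int :=
  (PySem.List.pyGet? ((PySem.List.pyGet? point 0).getD []) 0).getD 0
def ptY (point : List (List Int)) : Int :=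
  (PySem.List.pyGet? ((PySem.List.pyGet? point 0).getD []) 1).getD 0

-- ===== PORT A =====
-- Corner.update_score
def cornersUpd (c : List Int × Int) (X Y score : Int) : List Int × Int :=
  if score > c.2 then ([X, Y], score) else c

def cal_corners (contour : List (List (List Int))) : List (List Int) :=
  let init : (List Int × Int) × (List Int × Int) × (List Int × Int) × (List Int × Int) :=
    (([], -10000), ([], -10000), ([], -10000), ([], -10000))
  let st := contour.foldl (fun s point =>
    let x := ptX point
    let y := ptY point
    (cornersUpd s.1 x y (-x - y), cornersUpd s.2.1 x y (x - y),
     cornersUpd s.2.2.1 x y (-x + y), cornersUpd s.2.2.2 x y (x + y))) init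
  [st.1.1, st.2.1.1, st.2.2.1.1, st.2.2.2.1]

-- ===== PORT B =====
def bestCorner (contour : List (List (List Int))) (sx sy : Int) : List Int :=
  match PySem.List.max? contour (fun pt => sx * ptX pt + sy * ptY pt) with
  | some p => [ptX p, ptY p]
  | none => []

def cal_corners_alt (contour : List (List (List Int))) : List (List Int) :=
  match contour with
  | [] => [[], [], [], []]
  | _ :: _ =>
    [bestCorner contour (-1) (-1), bestCorner contour 1 (-1),
     bestCorner contour (-1) 1, bestCorner contour 1 1]

-- ===== PRECONDITION & SPEC =====
-- Pre_ excludes malformed points, on which Python's point[0][0] / point[0][1] raise IndexError.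
def Pre_cal_corners (contour : List (List (List Int))) : Prop :=
  ∀ p ∈ contour, p ≠ [] ∧ 2 ≤ (p.headD []).length
instance (contour : List (List (List Int))) : Decidable (Pre_cal_corners contour) := by
  unfold Pre_cal_corners; infer_instance

def pvWitness_cal_corners : List (List (List Int)) := [[[0, 0]], [[3, 1]]]

-- On nonempty contours where for one of the four directions every point's score
-- ±x±y is ≤ -10000, A returns [] for that corner (its arbitrary -10000 sentinel
-- is never beaten) while B returns the actual extreme point, which is the
-- intended corner.
def D_cal_corners (contour : List (List (List Int))) : Prop :=
  contour ≠ [] ∧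
    ((∀ p ∈ contour, -ptX p - ptY p ≤ -10000) ∨
     (∀ p ∈ contour, ptX p - ptY p ≤ -10000) ∨
     (∀ p ∈ contour, -ptX p + ptY p ≤ -10000) ∨
     (∀ p ∈ contour, ptX p + ptY p ≤ -10000))
instance (contour : List (List (List Int))) : Decidable (D_cal_corners contour) := by
  unfold D_cal_corners; infer_instance

def Spec_cal_corners (contour : List (List (List Int))) (out : List (List Int)) : Prop :=
  ¬ D_cal_corners contour → out = cal_corners_alt contour
instance (contour : List (List (List Int))) (out : List (List Int)) : Decidable (Spec_cal_corners contour out) := by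
  unfold Spec_cal_corners; infer_instance

def pvDiffWitness_cal_corners : List (List (List Int)) := [[[0, 20000]]]
def pvDiffWitnessOut_cal_corners : (List (List Int)) × (List (List Int)) :=
  ([[], [], [0, 20000], [0, 20000]],
   [[0, 20000], [0, 20000], [0, 20000], [0, 20000]])

-- ===== CLAIM (what is proved, stated in full; the proofs are below) =====
def Claim_unchanged_cal_corners : Prop := ∀ (contour : List (List (List Int))), Dom_cal_corners contour → Pre_cal_corners contour → Spec_cal_corners contour (cal_corners contour)
def Claim_changed_cal_corners : Prop := Dom_cal_corners (pvDiffWitness_cal_corners) ∧ Pre_cal_corners (pvDiffWitness_cal_corners) ∧ D_cal_corners (pvDiffWitness_cal_corners) ∧ cal_corners (pvDiffWitness_cal_corners) = pvDiffWitnessOut_cal_corners.1 ∧ cal_corners_alt (pvDiffWitness_cal_corners) = pvDiffWitnessOut_cal_corners.2 ∧ pvDiffWitnessOut_cal_corners.1 ≠ pvDiffWitnessOut_cal_corners.2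
def Claim_exact_cal_corners : Prop := ∀ (contour : List (List (List Int))), Dom_cal_corners contour → Pre_cal_corners contour → D_cal_corners contour → cal_corners contour ≠ cal_corners_alt contour

-- ===== LEMMAS AND PROOFS =====

-- A's per-direction step, and B's running "first maximum" fold.
def stepA (g : List (List Int) → Int) (c : List Int × Int) (pt : List (List Int)) : List Int × Int :=
  if g pt > c.2 then ([ptX pt, ptY pt], g pt) else c

def foldB (g : List (List Int) → Int) (b : List (List Int)) (l : List (List (List Int))) : List (List Int) :=
  l.foldl (fun m x => if g m < g x then x else m) b

theorem foldl_split4 (g1 g2 g3 g4 : List (List Int) → Int)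
    (hg1 : ∀ pt, g1 pt = -ptX pt - ptY pt) (hg2 : ∀ pt, g2 pt = ptX pt - ptY pt)
    (hg3 : ∀ pt, g3 pt = -ptX pt + ptY pt) (hg4 : ∀ pt, g4 pt = ptX pt + ptY pt)
    (l : List (List (List Int)))
    (s : (List Int × Int) × (List Int × Int) × (List Int × Int) × (List Int × Int)) :
    l.foldl (fun s point =>
      let x := ptX point
      let y := ptY point
      (cornersUpd s.1 x y (-x - y), cornersUpd s.2.1 x y (x - y),
       cornersUpd s.2.2.1 x y (-x + y), cornersUpd s.2.2.2 x y (x + y))) s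
    = (l.foldl (stepA g1) s.1, l.foldl (stepA g2) s.2.1,
       l.foldl (stepA g3) s.2.2.1, l.foldl (stepA g4) s.2.2.2) := by
  induction l generalizing s with
  | nil => rfl
  | cons p t ih =>
    simp only [List.foldl_cons]
    rw [ih]
    congr 1 <;> [skip; congr 1] <;> try congr 1
    all_goals simp [cornersUpd, stepA, hg1, hg2, hg3, hg4]

theorem max?_cons (g : List (List Int) → Int) (x : List (List Int)) (t : List (List (List Int))) :
    PySem.List.max? (x :: t) g = some (foldB g x t) := by
  induction t generalizing x with
  | nil => rfl
  | cons p r ih =>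
    have h1 : PySem.List.max? (x :: p :: r) g
        = PySem.List.max? ((if g x < g p then p else x) :: r) g := by
      simp only [PySem.List.max?, List.foldl_cons]
      split <;> rfl
    have h2 : foldB g x (p :: r) = foldB g (if g x < g p then p else x) r := by
      simp only [foldB, List.foldl_cons]
    rw [h1, ih, h2]

-- the two loops stay in lock-step: either A's corner state mirrors B's current
-- best, or A is still at its sentinel and every score seen so far was ≤ -10000.
theorem sync (g : List (List Int) → Int) (l : List (List (List Int)))
    (c : List Int × Int) (b : List (List Int))
    (h : c = ([ptX b, ptY b], g b) ∨ (c = ([], -10000) ∧ g b ≤ -10000)) :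
    (l.foldl (stepA g) c = ([ptX (foldB g b l), ptY (foldB g b l)], g (foldB g b l))) ∨
    (c = ([], -10000) ∧ l.foldl (stepA g) c = ([], -10000) ∧ ∀ p ∈ l, g p ≤ -10000) := by
  induction l generalizing c b with
  | nil =>
    rcases h with h | ⟨h1, _⟩
    · exact Or.inl (by simpa [foldB] using h)
    · exact Or.inr ⟨h1, by simpa [foldB] using h1, by simp⟩
  | cons p t ih =>
    simp only [List.foldl_cons]
    rcases h with h | ⟨h1, h2⟩
    · -- lock-step case: both compare against g b
      subst h
      by_cases hc : g b < g p
      · have := ih (stepA g ([ptX b, ptY b], g b) p) p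
          (Or.inl (by simp [stepA, hc]))
        rcases this with h' | ⟨he, _⟩
        · left; simpa [foldB, hc] using h'
        · exfalso; simp [stepA, hc] at he
      · have := ih (stepA g ([ptX b, ptY b], g b) p) b
          (Or.inl (by simp [stepA, hc]))
        rcases this with h' | ⟨he, _⟩
        · left; simpa [foldB, hc] using h'
        · exfalso; simp [stepA, hc] at he
    · subst h1
      by_cases hp : g p > -10000
      · -- A leaves the sentinel, B switches to p (g b ≤ -10000 < g p)
        have hb : g b < g p := lt_of_le_of_lt h2 hp
        have := ih (stepA g ([], -10000) p) p (Or.inl (by simp [stepA, hp]))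
        rcases this with h' | ⟨he, _⟩
        · left; simpa [foldB, hb] using h'
        · exfalso; simp [stepA, hp] at he
      · -- p is no better than the sentinel either
        have hp' : g p ≤ -10000 := not_lt.mp hp
        have hstep : stepA g ([], -10000) p = ([], -10000) := by simp [stepA, hp]
        by_cases hb : g b < g p
        · have := ih (stepA g ([], -10000) p) p (Or.inr ⟨hstep, hp'⟩)
          rcases this with h' | ⟨_, he2, he3⟩
          · left; simpa [foldB, hb] using h'
          · right
            refine ⟨rfl, by simpa [hstep] using he2, ?_⟩
            intro q hq
            rcases List.mem_cons.mp hq with rfl | hq'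
            · exact hp'
            · exact he3 _ hq' 
        · have := ih (stepA g ([], -10000) p) b (Or.inr ⟨hstep, h2⟩)
          rcases this with h' | ⟨_, he2, he3⟩
          · left; simpa [foldB, hb] using h'
          · right
            refine ⟨rfl, by simpa [hstep] using he2, ?_⟩
            intro q hq
            rcases List.mem_cons.mp hq with rfl | hq'
            · exact hp'
            · exact he3 _ hq' 

-- if every score is ≤ -10000, A's corner never moves off the sentinel
theorem stays_sentinel (g : List (List Int) → Int) (l : List (List (List Int)))
    (h : ∀ p ∈ l, g p ≤ -10000) :
    l.foldl (stepA g) ([], -10000) = ([], -10000) := by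
  induction l with
  | nil => rfl
  | cons p t ih =>
    have hp : ¬ g p > -10000 := not_lt.mpr (h p (by simp))
    simp only [List.foldl_cons, stepA, hp]
    exact ih (fun q hq => h q (by simp [hq]))

-- per-direction agreement when some point beats the sentinel
theorem dir_eq (g : List (List Int) → Int) (x : List (List Int)) (t : List (List (List Int)))
    (hex : ∃ p ∈ x :: t, g p > -10000) :
    ((x :: t).foldl (stepA g) ([], -10000)).1
      = [ptX (foldB g x t), ptY (foldB g x t)] := by
  simp only [List.foldl_cons]
  by_cases hx : g x > -10000
  · have := sync g t (stepA g ([], -10000) x) x (Or.inl (by simp [stepA, hx]))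
    rcases this with h' | ⟨he, _, _⟩
    · rw [h']
    · exfalso; simp [stepA, hx] at he
  · have hx' : g x ≤ -10000 := not_lt.mp hx
    have hstep : stepA g ([], -10000) x = ([], -10000) := by simp [stepA, hx]
    have := sync g t (stepA g ([], -10000) x) x (Or.inr ⟨hstep, hx'⟩)
    rcases this with h' | ⟨_, _, hall⟩
    · rw [h']
    · exfalso
      rcases hex with ⟨p, hp, hgp⟩
      rcases List.mem_cons.mp hp with rfl | hp'
      · exact absurd hgp (not_lt.mpr hx')
      · exact absurd hgp (not_lt.mpr (hall _ hp'))

def gTL (pt : List (List Int)) : Int := -ptX pt - ptY pt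
def gTR (pt : List (List Int)) : Int := ptX pt - ptY pt
def gBL (pt : List (List Int)) : Int := -ptX pt + ptY pt
def gBR (pt : List (List Int)) : Int := ptX pt + ptY pt

theorem calA (l : List (List (List Int))) :
    cal_corners l =
      [(l.foldl (stepA gTL) ([], -10000)).1, (l.foldl (stepA gTR) ([], -10000)).1,
       (l.foldl (stepA gBL) ([], -10000)).1, (l.foldl (stepA gBR) ([], -10000)).1] := by
  have h := foldl_split4 gTL gTR gBL gBR (fun _ => rfl) (fun _ => rfl) (fun _ => rfl)
    (fun _ => rfl) l (([], -10000), ([], -10000), ([], -10000), ([], -10000))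
  simp only [cal_corners, h]

theorem calB (x : List (List Int)) (t : List (List (List Int))) :
    cal_corners_alt (x :: t) =
      [[ptX (foldB gTL x t), ptY (foldB gTL x t)], [ptX (foldB gTR x t), ptY (foldB gTR x t)],
       [ptX (foldB gBL x t), ptY (foldB gBL x t)], [ptX (foldB gBR x t), ptY (foldB gBR x t)]] := by
  have k1 : (fun pt => (-1 : Int) * ptX pt + (-1 : Int) * ptY pt) = gTL :=
    funext fun pt => by unfold gTL; ring
  have k2 : (fun pt => (1 : Int) * ptX pt + (-1 : Int) * ptY pt) = gTR :=
    funext fun pt => by unfold gTR; ring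
  have k3 : (fun pt => (-1 : Int) * ptX pt + (1 : Int) * ptY pt) = gBL :=
    funext fun pt => by unfold gBL; ring
  have k4 : (fun pt => (1 : Int) * ptX pt + (1 : Int) * ptY pt) = gBR :=
    funext fun pt => by unfold gBR; ring
  simp only [cal_corners_alt, bestCorner, k1, k2, k3, k4, max?_cons]

theorem cal_corners_spec : Claim_unchanged_cal_corners := by
  intro contour _ _ hD
  cases contour with
  | nil => rfl
  | cons x t =>
    unfold D_cal_corners at hD
    push Not at hD
    obtain ⟨e1, e2, e3, e4⟩ := hD (by simp)
    rw [calA, calB]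
    rw [dir_eq gTL x t (by obtain ⟨p, hp, h⟩ := e1; exact ⟨p, hp, h⟩),
        dir_eq gTR x t (by obtain ⟨p, hp, h⟩ := e2; exact ⟨p, hp, h⟩),
        dir_eq gBL x t (by obtain ⟨p, hp, h⟩ := e3; exact ⟨p, hp, h⟩),
        dir_eq gBR x t (by obtain ⟨p, hp, h⟩ := e4; exact ⟨p, hp, h⟩)]

theorem cal_corners_tight : Claim_exact_cal_corners := by
  intro contour _ _ hD hEq
  obtain ⟨hne, hcase⟩ := hD
  cases contour with
  | nil => exact hne rfl
  | cons x t =>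
    rw [calA, calB] at hEq
    rcases hcase with h | h | h | h
    · have hA := stays_sentinel gTL (x :: t) h
      simp only [List.foldl_cons] at hA hEq
      rw [hA] at hEq
      simp at hEq
    · have hA := stays_sentinel gTR (x :: t) h
      simp only [List.foldl_cons] at hA hEq
      rw [hA] at hEq
      simp at hEq
    · have hA := stays_sentinel gBL (x :: t) h
      simp only [List.foldl_cons] at hA hEq
      rw [hA] at hEq
      simp at hEq
    · have hA := stays_sentinel gBR (x :: t) h
      simp only [List.foldl_cons] at hA hEq
      rw [hA] at hEq
      simp at hEq

-- ===== VERDICT (by name: the statement is the Claim_ definition above) =====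
theorem cal_corners_changed : Claim_changed_cal_corners := by
  unfold Claim_changed_cal_corners; decide
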